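-- pv_equiv track=rewrite | github.com/rvemuri2/leetcode_problems | mock_interviews/day1-nov29/code.py | WordOccurrence
-- ===== SOURCE A (Python) =====
-- from collections import Counter
--
-- def WordOccurrence(sentence: str) -> dict:
--
--
--     words = Counter()
--
--     result = sentence.split(" ")
--
--
-- # a
-- # ab.
-- # abc
--
--     for word in result:
--         length = 0
--
--         for i in word:
--             if(i.isalpha()):
--                 length += 1
--
--         words[length] += 1
--
--     return words
-- ===== SOURCE B (Python) =====
-- from collections import Counter
--
-- def WordOccurrence(sentence: str) -> dict:
--     # single pass over the characters: a space ends the current token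
--     words = Counter()
--     length = 0
--     for c in sentence:
--         if c == ' ':
--             words[length] += 1
--             length = 0
--         elif c.isalpha():
--             length += 1
--     words[length] += 1
--     return words
-- ===== Notes on version B (the rewrite author's own statement) =====
-- stated objective: simpler
-- what changed: Replaces the split-on-single-space list plus a nested per-word counting loop by a single pass over the characters with a running alpha-length, bumping the Counter at each space character and once after the loop.
import Mathlib
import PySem

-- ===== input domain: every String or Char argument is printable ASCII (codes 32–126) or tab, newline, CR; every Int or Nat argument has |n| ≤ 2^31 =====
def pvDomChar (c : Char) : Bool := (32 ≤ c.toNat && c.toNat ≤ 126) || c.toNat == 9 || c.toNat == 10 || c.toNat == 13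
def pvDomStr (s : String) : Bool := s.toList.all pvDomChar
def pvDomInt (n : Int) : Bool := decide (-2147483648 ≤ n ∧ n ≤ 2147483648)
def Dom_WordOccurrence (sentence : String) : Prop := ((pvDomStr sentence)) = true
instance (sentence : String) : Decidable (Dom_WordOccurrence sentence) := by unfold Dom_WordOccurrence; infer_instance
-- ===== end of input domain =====

-- B replaces split(" ") + nested per-word loop by one linear pass over the characters
-- with a running alpha-length and a Counter bumped at each space and once at the end (objective: simpler).

-- ===== PORT A =====
def WordOccurrence (sentence : String) : List (Int × Int) :=
  let words : PySem.Dict Int Int := PySem.Dict.empty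
  let result := PySem.Chars.splitOn sentence.toList [' ']
  let words := result.foldl (fun words word =>
    let length : Int := 0
    let length := word.foldl (fun length i =>
      if PySem.Chars.isalpha i then length + 1 else length) length
    words.modify length 0 (· + 1)) words
  words.items

-- ===== PORT B =====
def WordOccurrence_alt_loop (cs : List Char) (length : Int) (words : PySem.Dict Int Int) :
    PySem.Dict Int Int :=
  match cs with
  | [] => words.modify length 0 (· + 1)
  | c :: rest =>
    if c == ' ' then WordOccurrence_alt_loop rest 0 (words.modify length 0 (· + 1))
    else if PySem.Chars.isalpha c then WordOccurrence_alt_loop rest (length + 1) words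
    else WordOccurrence_alt_loop rest length words

def WordOccurrence_alt (sentence : String) : List (Int × Int) :=
  (WordOccurrence_alt_loop sentence.toList 0 PySem.Dict.empty).items

-- ===== PRECONDITION & SPEC =====
def Spec_WordOccurrence (sentence : String) (out : List (Int × Int)) : Prop := out = WordOccurrence_alt sentence
instance (sentence : String) (out : List (Int × Int)) : Decidable (Spec_WordOccurrence sentence out) := by unfold Spec_WordOccurrence; infer_instance

-- ===== CLAIM (what is proved, stated in full; the proofs are below) =====
def Claim_equal_WordOccurrence : Prop := ∀ (sentence : String), Dom_WordOccurrence sentence → Spec_WordOccurrence sentence (WordOccurrence sentence)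

-- ===== LEMMAS AND PROOFS =====

/-- Simple structural recursion computing `split` on a single separator char. -/
def pvSplit1 (c : Char) : List Char → List (List Char)
  | [] => [[]]
  | x :: xs =>
    if x = c then [] :: pvSplit1 c xs
    else (pvSplit1 c xs).modifyHead (x :: ·)

theorem pvSplit1_ne_nil (c : Char) (l : List Char) : pvSplit1 c l ≠ [] := by
  induction l with
  | nil => simp [pvSplit1]
  | cons x xs ih =>
    simp only [pvSplit1]
    split_ifs
    · simp
    · cases h : pvSplit1 c xs with
      | nil => exact absurd h ih
      | cons p ps => simp

theorem splitOn_go_single (c : Char) (fuel : Nat) (l cur : List Char)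
    (acc : List (List Char)) (h : l.length < fuel) :
    PySem.Chars.splitOn.go [c] fuel l cur acc =
      acc.reverse ++ (pvSplit1 c l).modifyHead (cur.reverse ++ ·) := by
  induction fuel generalizing l cur acc with
  | zero => omega
  | succ fuel ih =>
    cases l with
    | nil => simp [PySem.Chars.splitOn.go, pvSplit1]
    | cons x xs =>
      by_cases hx : x = c
      · subst hx
        have hp : List.isPrefixOf [x] (x :: xs) = true := by simp [List.isPrefixOf]
        rw [PySem.Chars.splitOn.go]
        simp only [hp, if_true, List.length_cons, List.length_nil, List.drop_succ_cons,
          List.drop_zero]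
        rw [ih xs [] (cur.reverse :: acc) (by simpa using Nat.lt_of_succ_lt_succ h)]
        simp [pvSplit1]
        cases pvSplit1 x xs <;> rfl
      · have hp : List.isPrefixOf [c] (x :: xs) = false := by
          simp [List.isPrefixOf, Ne.symm hx]
        rw [PySem.Chars.splitOn.go]
        simp only [hp, Bool.false_eq_true, if_false]
        rw [ih xs (x :: cur) acc (by simpa using Nat.lt_of_succ_lt_succ h)]
        have hne := pvSplit1_ne_nil c xs
        cases hxs : pvSplit1 c xs with
        | nil => exact absurd hxs hne
        | cons p ps => simp [pvSplit1, hx, hxs]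

theorem splitOn_single (c : Char) (l : List Char) :
    PySem.Chars.splitOn l [c] = pvSplit1 c l := by
  rw [PySem.Chars.splitOn, splitOn_go_single c (l.length + 1) l [] [] (by omega)]
  have hne := pvSplit1_ne_nil c l
  cases h : pvSplit1 c l with
  | nil => exact absurd h hne
  | cons p ps => simp

/-- alpha count of a word, as A's inner loop computes it. -/
def pvAc (w : List Char) : Int :=
  w.foldl (fun length i => if PySem.Chars.isalpha i then length + 1 else length) 0

theorem pvAc_foldl (w : List Char) (n : Int) :
    w.foldl (fun length i => if PySem.Chars.isalpha i then length + 1 else length) n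
      = n + pvAc w := by
  induction w generalizing n with
  | nil => simp [pvAc]
  | cons x xs ih =>
    show List.foldl _ (if PySem.Chars.isalpha x then n + 1 else n) xs = _
    rw [ih]
    have : pvAc (x :: xs) = (if PySem.Chars.isalpha x then (0:Int) + 1 else 0) + pvAc xs := by
      show List.foldl _ (if PySem.Chars.isalpha x then (0:Int) + 1 else 0) xs = _
      rw [ih]
    rw [this]
    split_ifs <;> ring

theorem pvAc_cons (x : Char) (xs : List Char) :
    pvAc (x :: xs) = (if PySem.Chars.isalpha x then (1:Int) else 0) + pvAc xs := by
  show List.foldl _ (if PySem.Chars.isalpha x then (0:Int) + 1 else 0) xs = _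
  rw [pvAc_foldl]
  split_ifs <;> ring

theorem loop_eq (cs : List Char) (n : Int) (d : PySem.Dict Int Int) :
    WordOccurrence_alt_loop cs n d =
      match pvSplit1 ' ' cs with
      | [] => d
      | p :: ps => ((n + pvAc p) :: ps.map pvAc).foldl (fun d k => d.modify k 0 (· + 1)) d := by
  induction cs generalizing n d with
  | nil => simp [WordOccurrence_alt_loop, pvSplit1, pvAc]
  | cons c rest ih =>
    by_cases hc : c = ' '
    · subst hc
      simp only [WordOccurrence_alt_loop, beq_self_eq_true, if_true, pvSplit1]
      rw [ih]
      have hne := pvSplit1_ne_nil ' ' rest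
      cases h : pvSplit1 ' ' rest with
      | nil => exact absurd h hne
      | cons p ps => simp [pvAc]
    · have hb : (c == ' ') = false := by simp [hc]
      have key : ∀ m : Int,
          WordOccurrence_alt_loop (c :: rest) m d = WordOccurrence_alt_loop rest
            (m + if PySem.Chars.isalpha c then 1 else 0) d := by
        intro m
        simp only [WordOccurrence_alt_loop, hb, Bool.false_eq_true, if_false]
        split_ifs <;> simp
      rw [key, ih]
      have hne := pvSplit1_ne_nil ' ' rest
      cases h : pvSplit1 ' ' rest with
      | nil => exact absurd h hne
      | cons p ps =>
        simp only [pvSplit1, hc, if_false, h, List.modifyHead, pvAc_cons]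
        rw [add_assoc]

theorem ports_agree (sentence : String) :
    WordOccurrence sentence = WordOccurrence_alt sentence := by
  unfold WordOccurrence WordOccurrence_alt
  rw [splitOn_single, loop_eq]
  have hne := pvSplit1_ne_nil ' ' sentence.toList
  cases h : pvSplit1 ' ' sentence.toList with
  | nil => exact absurd h hne
  | cons p ps =>
    dsimp only
    congr 1
    rw [show ((0:Int) + pvAc p) :: ps.map pvAc = (p :: ps).map pvAc by simp]
    rw [List.foldl_map]
    rfl

-- ===== VERDICT (by name: the statement is the Claim_ definition above) =====
theorem WordOccurrence_spec : Claim_equal_WordOccurrence := by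
  intro sentence _
  exact ports_agree sentence
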